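-- pv_equiv track=rewrite | github.com/luiscp1701/PCAP | ejercicios/Nivel 1/2_ordena_positivos.py | ordena_positivos
-- ===== SOURCE A (Python) =====
-- def ordena_positivos(lista):
--     positivos = sorted([num for num in lista if num > 0])
--     resultado = []
--
--     indice_positivos = 0
--     for num in lista:
--         if num > 0:
--             resultado.append(positivos[indice_positivos])
--             indice_positivos += 1
--         else:
--             resultado.append(num)
--     return resultado
-- ===== SOURCE B (Python) =====
-- def _inserta(res, n):
--     # one carry pass: slide n rightward through the positive slots until its place
--     out = []
--     carry = n
--     for x in res:
--         if x > 0 and x > carry: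
--             out.append(carry)
--             carry = x
--         else:
--             out.append(x)
--     out.append(carry)
--     return out
--
-- def ordena_positivos(lista):
--     # online insertion sort over the positive slots: no sorted() call, no counter
--     resultado = []
--     for n in lista:
--         if n > 0:
--             resultado = _inserta(resultado, n)
--         else:
--             resultado.append(n)
--     return resultado
-- ===== Notes on version B (the rewrite author's own statement) =====
-- stated objective: alternative
-- what changed: B is an online insertion sort: each positive element is slid with a carry pass into its place among the positive slots of the accumulated result, instead of A's pre-sorting the positives with sorted() and reinserting them with a running counter.
import Mathlib
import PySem

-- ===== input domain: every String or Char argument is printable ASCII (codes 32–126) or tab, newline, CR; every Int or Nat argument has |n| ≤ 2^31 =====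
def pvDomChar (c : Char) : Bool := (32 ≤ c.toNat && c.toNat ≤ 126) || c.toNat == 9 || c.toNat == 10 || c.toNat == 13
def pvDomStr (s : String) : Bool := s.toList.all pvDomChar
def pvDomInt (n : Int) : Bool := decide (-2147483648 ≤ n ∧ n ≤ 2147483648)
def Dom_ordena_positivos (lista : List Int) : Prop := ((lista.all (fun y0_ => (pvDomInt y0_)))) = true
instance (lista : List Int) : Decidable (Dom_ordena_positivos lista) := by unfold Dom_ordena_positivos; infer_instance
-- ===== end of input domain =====

-- B is an online insertion sort: each positive is slid with a carry pass into its place among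
-- the positive slots of the accumulated result, instead of A's sorted() + counter reinsertion.


-- ===== PORT A =====
-- the 'for num in lista' loop with state (indice_positivos, resultado);
-- positivos[indice_positivos] is always in range, ported with pyGetD (index is nonnegative)
def ordenaLoopA : List Int → List Int → Nat → List Int → List Int
  | [], _, _, res => res
  | x :: xs, pos, i, res =>
    if 0 < x then ordenaLoopA xs pos (i + 1) (res ++ [PySem.List.pyGetD pos (i : Int) 0])
    else ordenaLoopA xs pos i (res ++ [x])

def ordena_positivos (lista : List Int) : List Int :=
  let positivos := PySem.List.sorted (lista.filter (fun num => decide (0 < num))) (fun x => x) false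
  ordenaLoopA lista positivos 0 []

-- ===== PORT B =====
-- _inserta(res, n): one carry pass over res, carry slides through the positive slots
def inserta : List Int → Int → List Int
  | [], carry => [carry]
  | x :: xs, carry => if 0 < x ∧ carry < x then carry :: inserta xs x else x :: inserta xs carry

def ordena_positivos_alt (lista : List Int) : List Int :=
  lista.foldl (fun resultado n => if 0 < n then inserta resultado n else resultado ++ [n]) []

-- ===== PRECONDITION & SPEC =====
def Spec_ordena_positivos (lista : List Int) (out : List Int) : Prop := out = ordena_positivos_alt lista
instance (lista : List Int) (out : List Int) : Decidable (Spec_ordena_positivos lista out) := by unfold Spec_ordena_positivos; infer_instance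

-- ===== CLAIM (what is proved, stated in full; the proofs are below) =====
def Claim_equal_ordena_positivos : Prop := ∀ (lista : List Int), Dom_ordena_positivos lista → Spec_ordena_positivos lista (ordena_positivos lista)

-- ===== LEMMAS AND PROOFS =====

-- reference shape: fill the positive slots of xs with vs, left to right
def pvMerge : List Int → List Int → List Int
  | [], _ => []
  | x :: xs, vs => if 0 < x then vs.headD 0 :: pvMerge xs vs.tail else x :: pvMerge xs vs

-- plain sorted insertion (insert before the first strictly greater element)
def pvIns (c : Int) : List Int → List Int
  | [] => [c]
  | v :: vs => if c < v then c :: v :: vs else v :: pvIns c vs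

def pvPos (q : List Int) : Nat := (q.filter (fun n => decide (0 < n))).length

theorem loopA_eq_merge (xs : List Int) : ∀ (pos : List Int) (i : Nat) (res : List Int),
    ordenaLoopA xs pos i res = res ++ pvMerge xs (pos.drop i) := by
  induction xs with
  | nil => intro pos i res; simp [ordenaLoopA, pvMerge]
  | cons x xs ih =>
    intro pos i res
    by_cases hx : 0 < x
    · simp only [ordenaLoopA, ih, pvMerge, if_pos hx]
      rw [List.tail_drop]
      have : PySem.List.pyGetD pos (i : Int) 0 = (pos.drop i).headD 0 := by
        simp [PySem.List.pyGetD_natCast, List.getD, ← List.head?_drop, List.headD_eq_head?_getD]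
      simp [this]
    · simp [ordenaLoopA, ih, pvMerge, hx]

theorem merge_sentinel (q : List Int) : ∀ (vs : List Int) (a b : Int) (xs : List Int),
    0 < a → 0 < b → pvMerge (q ++ a :: xs) vs = pvMerge (q ++ b :: xs) vs := by
  induction q with
  | nil => intro vs a b xs ha hb; simp [pvMerge, ha, hb]
  | cons x q ih =>
    intro vs a b xs ha hb
    by_cases hx : 0 < x
    · simp [pvMerge, hx, ih _ _ _ _ ha hb]
    · simp [pvMerge, hx, ih _ _ _ _ ha hb]

theorem merge_append_nonpos (q : List Int) : ∀ (vs : List Int) (n : Int),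
    vs.length = pvPos q → ¬ 0 < n → pvMerge (q ++ [n]) vs = pvMerge q vs ++ [n] := by
  induction q with
  | nil =>
    intro vs n hl hn
    have : vs = [] := List.eq_nil_of_length_eq_zero (by simpa [pvPos] using hl)
    subst this; simp [pvMerge, hn]
  | cons x q ih =>
    intro vs n hl hn
    by_cases hx : 0 < x
    · obtain ⟨v, vt, rfl⟩ : ∃ v vt, vs = v :: vt := by
        cases vs with
        | nil => simp [pvPos, hx] at hl
        | cons v vt => exact ⟨v, vt, rfl⟩
      have hl' : vt.length = pvPos q := by
        simp [pvPos, hx] at hl ⊢; omega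
      simp [pvMerge, hx, ih vt n hl' hn]
    · have hl' : vs.length = pvPos q := by simpa [pvPos, List.filter_cons, hx] using hl
      simp [pvMerge, hx, ih vs n hl' hn]

theorem pvIns_perm (c : Int) (vs : List Int) : (pvIns c vs).Perm (c :: vs) := by
  induction vs with
  | nil => simp [pvIns]
  | cons v vt ih =>
    by_cases hc : c < v
    · simp [pvIns, hc]
    · simp only [pvIns, if_neg hc]
      exact (ih.cons v).trans (List.Perm.swap c v vt)

theorem mem_pvIns {w c : Int} {vs : List Int} (h : w ∈ pvIns c vs) : w = c ∨ w ∈ vs := by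
  have := (pvIns_perm c vs).mem_iff.mp h
  simpa using this

theorem pvIns_length (c : Int) (vs : List Int) : (pvIns c vs).length = vs.length + 1 := by
  simpa using (pvIns_perm c vs).length_eq

theorem pvIns_of_le (c : Int) (vs : List Int) (h : ∀ w ∈ vs, c ≤ w) : pvIns c vs = c :: vs := by
  induction vs with
  | nil => rfl
  | cons v vt ih =>
    by_cases hv : c < v
    · simp [pvIns, hv]
    · have hcv : c = v := le_antisymm (h v (by simp)) (by omega)
      have hvt := ih (fun w hw => h w (by simp [hw]))
      subst hcv
      simp [pvIns, hvt]

theorem pvIns_pairwise (c : Int) (vs : List Int) (h : vs.Pairwise (· ≤ ·)) :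
    (pvIns c vs).Pairwise (· ≤ ·) := by
  induction vs with
  | nil => simp [pvIns]
  | cons v vt ih =>
    rcases List.pairwise_cons.mp h with ⟨hv, ht⟩
    by_cases hc : c < v
    · simp only [pvIns, if_pos hc]
      refine List.pairwise_cons.mpr ⟨?_, h⟩
      intro w hw
      rcases (by simpa using hw : w = v ∨ w ∈ vt) with rfl | hw
      · omega
      · exact le_trans (le_of_lt hc) (hv w hw)
    · simp only [pvIns, if_neg hc]
      refine List.pairwise_cons.mpr ⟨?_, ih ht⟩
      intro w hw
      rcases mem_pvIns hw with rfl | hmem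
      · omega
      · exact hv w hmem

theorem inserta_merge (xs : List Int) : ∀ (vs : List Int) (c : Int),
    (∀ v ∈ vs, 0 < v) → vs.Pairwise (· ≤ ·) → vs.length = pvPos xs → 0 < c →
    inserta (pvMerge xs vs) c = pvMerge (xs ++ [1]) (pvIns c vs) := by
  induction xs with
  | nil =>
    intro vs c _ _ hl hc
    have : vs = [] := List.eq_nil_of_length_eq_zero (by simpa [pvPos] using hl)
    subst this
    simp [pvMerge, inserta, pvIns]
  | cons x xs ih =>
    intro vs c hv hs hl hc
    by_cases hx : 0 < x
    · obtain ⟨v, vt, rfl⟩ : ∃ v vt, vs = v :: vt := by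
        cases vs with
        | nil => simp [pvPos, hx] at hl
        | cons v vt => exact ⟨v, vt, rfl⟩
      have hvpos : 0 < v := hv v (by simp)
      have hl' : vt.length = pvPos xs := by
        simp [pvPos, hx] at hl ⊢; omega
      rcases List.pairwise_cons.mp hs with ⟨hle, hst⟩
      have hvt : ∀ w ∈ vt, 0 < w := fun w hw => hv w (by simp [hw])
      by_cases hcv : c < v
      · have h1 : inserta (pvMerge xs vt) v = pvMerge (xs ++ [1]) (pvIns v vt) :=
          ih vt v hvt hst hl' hvpos
        have h2 : pvIns v vt = v :: vt := pvIns_of_le v vt hle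
        simp [pvMerge, inserta, hx, hvpos, hcv, pvIns, h1, h2]
      · have h1 : inserta (pvMerge xs vt) c = pvMerge (xs ++ [1]) (pvIns c vt) :=
          ih vt c hvt hst hl' hc
        simp [pvMerge, inserta, hx, hvpos, hcv, pvIns, h1]
    · have hl' : vs.length = pvPos xs := by simpa [pvPos, List.filter_cons, hx] using hl
      simp [pvMerge, inserta, hx, ih vs c hv hs hl' hc]

theorem loopB_merge (xs : List Int) : ∀ (q vs : List Int),
    (∀ v ∈ vs, 0 < v) → vs.Pairwise (· ≤ ·) → vs.length = pvPos q →
    xs.foldl (fun resultado n => if 0 < n then inserta resultado n else resultado ++ [n]) (pvMerge q vs)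
      = pvMerge (q ++ xs) (xs.foldl (fun a n => if 0 < n then pvIns n a else a) vs) := by
  induction xs with
  | nil => intro q vs _ _ _; simp
  | cons n xs ih =>
    intro q vs hv hs hl
    by_cases hn : 0 < n
    · simp only [List.foldl_cons, if_pos hn]
      rw [inserta_merge q vs n hv hs hl hn]
      have hv' : ∀ v ∈ pvIns n vs, 0 < v := by
        intro v hvm
        rcases mem_pvIns hvm with rfl | h
        · exact hn
        · exact hv v h
      have hl' : (pvIns n vs).length = pvPos (q ++ [1]) := by
        simp [pvPos] at hl
        simp [pvIns_length, pvPos, List.filter_append]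
        omega
      rw [ih (q ++ [1]) (pvIns n vs) hv' (pvIns_pairwise n vs hs) hl']
      rw [List.append_assoc, List.singleton_append,
        merge_sentinel q _ 1 n xs one_pos hn]
    · simp only [List.foldl_cons, if_neg hn]
      rw [← merge_append_nonpos q vs n hl hn]
      have hl' : vs.length = pvPos (q ++ [n]) := by
        simp [pvPos, List.filter_append, hn] at hl ⊢; omega
      rw [ih (q ++ [n]) vs hv hs hl']
      simp

theorem foldIns_pairwise (xs : List Int) : ∀ (vs : List Int), vs.Pairwise (· ≤ ·) →
    (xs.foldl (fun a n => if 0 < n then pvIns n a else a) vs).Pairwise (· ≤ ·) := by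
  induction xs with
  | nil => intro vs h; simpa using h
  | cons n xs ih =>
    intro vs h
    by_cases hn : 0 < n
    · simpa [hn] using ih (pvIns n vs) (pvIns_pairwise n vs h)
    · simpa [hn] using ih vs h

theorem foldIns_perm (xs : List Int) : ∀ (vs : List Int),
    (xs.foldl (fun a n => if 0 < n then pvIns n a else a) vs).Perm
      (vs ++ xs.filter (fun n => decide (0 < n))) := by
  induction xs with
  | nil => intro vs; simp
  | cons n xs ih =>
    intro vs
    by_cases hn : 0 < n
    · simp only [List.foldl_cons, if_pos hn, List.filter_cons, decide_eq_true hn]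
      refine (ih (pvIns n vs)).trans ?_
      refine (List.Perm.append_right _ (pvIns_perm n vs)).trans ?_
      simp only [List.cons_append]
      exact (List.perm_middle).symm
    · simp only [List.foldl_cons, if_neg hn, List.filter_cons]
      simpa [hn] using ih vs

-- ===== VERDICT (by name: the statement is the Claim_ definition above) =====
theorem ordena_positivos_spec : Claim_equal_ordena_positivos := by
  intro lista _
  unfold Spec_ordena_positivos ordena_positivos ordena_positivos_alt
  rw [loopA_eq_merge, List.drop_zero, List.nil_append]
  have hB := loopB_merge lista [] [] (by simp) (by simp) (by simp [pvPos])
  simp only [pvMerge, List.nil_append] at hB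
  rw [hB]
  congr 1
  exact PySem.List.sorted_id_eq_of_perm_of_pairwise _ _
    (by simpa using foldIns_perm lista [])
    (foldIns_pairwise lista [] (by simp))
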